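-- pv_equiv track=rewrite | github.com/BoudewijnKlijn/competitive_programming | leetcode/leetcode_2598.py | faster
-- ===== SOURCE A (Python) =====
-- from typing import List
--
-- def faster(nums: List[int], value: int) -> int:
--     seen = {rem: 0 for rem in range(value)}
--     ans = 0
--     idx = 0
--     for num in nums:
--         rem = num % value
--         seen[rem] += 1
--         while seen[idx] > 0:
--             seen[idx] -= 1
--             idx = (
--                 idx + 1 if idx < value - 1 else 0
--             )  # faster than calling ans % value repeatedly
--             ans += 1
--     return ans
-- ===== SOURCE B (Python) =====
-- from typing import List
--
-- def faster(nums: List[int], value: int) -> int: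
--     seen = {}
--     for num in nums:
--         rem = num % value
--         seen[rem] = seen.get(rem, 0) + 1
--     return min((rem + seen.get(rem, 0) * value for rem in range(value)), default=0)
-- ===== Notes on version B (the rewrite author's own statement) =====
-- stated objective: simpler
-- what changed: Replaced A's interleaved greedy while-loop with idx/ans state by one residue-counting pass followed by a closed-form MEX: min over residues of rem + count[rem]*value (default 0).
import Mathlib
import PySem

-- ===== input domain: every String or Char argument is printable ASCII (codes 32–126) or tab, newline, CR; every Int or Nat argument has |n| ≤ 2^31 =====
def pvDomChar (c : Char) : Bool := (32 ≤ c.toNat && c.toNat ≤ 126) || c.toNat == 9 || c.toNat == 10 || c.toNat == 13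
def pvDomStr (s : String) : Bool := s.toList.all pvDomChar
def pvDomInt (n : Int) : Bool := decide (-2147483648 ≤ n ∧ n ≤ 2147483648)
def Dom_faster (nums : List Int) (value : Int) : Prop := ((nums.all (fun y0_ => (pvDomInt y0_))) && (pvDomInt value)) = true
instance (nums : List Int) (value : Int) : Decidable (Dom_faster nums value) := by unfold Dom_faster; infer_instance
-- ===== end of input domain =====

-- B replaces A's interleaved greedy while-loop (idx/ans state) by one residue-counting
-- pass followed by the closed-form MEX  min_r (r + count[r]*value); objective: simpler.

-- ===== PORT A =====
-- A's inner `while seen[idx] > 0` loop.  The fuel argument only makes the recursion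
-- total; the caller passes nums.length + 1, which is proved sufficient below, so on
-- Pre_faster the port computes exactly what A's while loop computes.  The lookups
-- seen[idx] are ported with getD, exact under Pre_faster where the key is present.
def fasterWhile (fuel : Nat) (value : Int) (seen : PySem.Dict Int Int) (idx ans : Int) :
    PySem.Dict Int Int × Int × Int :=
  match fuel with
  | 0 => (seen, idx, ans)
  | fuel + 1 =>
    if seen.getD idx 0 > 0 then
      fasterWhile fuel value (seen.insert idx (seen.getD idx 0 - 1))
        (if idx < value - 1 then idx + 1 else 0) (ans + 1)
    else (seen, idx, ans)

def faster (nums : List Int) (value : Int) : Int :=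
  -- seen = {rem: 0 for rem in range(value)}: a comprehension over the distinct keys
  -- range(value), so its items list is exactly the key/value pairs in range order
  let seen0 : PySem.Dict Int Int := PySem.Dict.mk ((PySem.List.pyRange 0 value).map (fun rem => (rem, 0)))
  let st := nums.foldl
    (fun (st : PySem.Dict Int Int × Int × Int) num =>
      let rem := PySem.Int.mod num value
      -- seen[rem] += 1  (key present under Pre_faster, so getD-based update is exact)
      let seen := st.1.insert rem (st.1.getD rem 0 + 1)
      fasterWhile (nums.length + 1) value seen st.2.1 st.2.2)
    (seen0, 0, 0)
  st.2.2

-- ===== PORT B =====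
def faster_alt (nums : List Int) (value : Int) : Int :=
  -- seen = {}; for num in nums: seen[rem] = seen.get(rem, 0) + 1
  let seen := nums.foldl
    (fun (d : PySem.Dict Int Int) num =>
      d.insert (PySem.Int.mod num value) (d.getD (PySem.Int.mod num value) 0 + 1))
    PySem.Dict.empty
  -- min((rem + seen.get(rem, 0) * value for rem in range(value)), default=0)
  PySem.List.minD
    ((PySem.List.pyRange 0 value).map (fun rem => rem + seen.getD rem 0 * value))
    (fun x => x) 0

-- ===== PRECONDITION & SPEC =====
-- Pre_ excludes exactly the inputs where A raises: for a nonempty nums, value = 0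
-- gives ZeroDivisionError at num % value and value < 0 a KeyError (seen is empty).
def Pre_faster (nums : List Int) (value : Int) : Prop := 0 < value ∨ nums = []
instance (nums : List Int) (value : Int) : Decidable (Pre_faster nums value) := by
  unfold Pre_faster; infer_instance

def pvWitness_faster : List Int × Int := ([0, 2, 5, -1], 3)

def Spec_faster (nums : List Int) (value : Int) (out : Int) : Prop := out = faster_alt nums value
instance (nums : List Int) (value : Int) (out : Int) : Decidable (Spec_faster nums value out) := by
  unfold Spec_faster; infer_instance

-- ===== CLAIM (what is proved, stated in full; the proofs are below) =====
def Claim_equal_faster : Prop := ∀ (nums : List Int) (value : Int), Dom_faster nums value → Pre_faster nums value → Spec_faster nums value (faster nums value)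

-- ===== LEMMAS AND PROOFS =====

-- the residue of x, and how many elements of l have residue r
def pvRes (v x : Int) : Int := PySem.Int.mod x v
def pvCnt (v : Int) (l : List Int) (r : Int) : Int := ((l.map (pvRes v)).count r : Int)
-- how many k ∈ [0, ans) have k % v = r  (for 0 ≤ r < v, 0 ≤ ans)
def pvPasses (v ans r : Int) : Int := ans / v + (if r < ans % v then 1 else 0)

-- invariant of A's loop state after processing the prefix l
def pvInv (v : Int) (l : List Int) (seen : PySem.Dict Int Int) (idx ans : Int) : Prop :=
  (∀ r, 0 ≤ r → r < v → seen.getD r 0 = pvCnt v l r - pvPasses v ans r) ∧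
  idx = ans % v ∧ 0 ≤ ans ∧
  (∀ r, 0 ≤ r → r < v → pvPasses v ans r ≤ pvCnt v l r)

lemma pvSucc (v ans : Int) (hv : 0 < v) :
    ((ans + 1) % v = if ans % v = v - 1 then 0 else ans % v + 1) ∧
    ((ans + 1) / v = if ans % v = v - 1 then ans / v + 1 else ans / v) := by
  have h := Int.ediv_add_emod ans v
  have hs0 : 0 ≤ ans % v := Int.emod_nonneg ans (ne_of_gt hv)
  have hs1 : ans % v < v := Int.emod_lt_of_pos ans hv
  by_cases hc : ans % v = v - 1
  · have hm : v * (ans / v + 1) = v * (ans / v) + v := by ring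
    have he : ans + 1 = v * (ans / v + 1) := by omega
    rw [he]
    constructor
    · simp [hc, Int.mul_emod_right]
    · simp [hc, Int.mul_ediv_cancel_left _ (ne_of_gt hv)]
  · have he : ans + 1 = (ans % v + 1) + v * (ans / v) := by omega
    rw [he]
    constructor
    · rw [Int.add_mul_emod_self_left, Int.emod_eq_of_lt (by omega) (by omega)]
      simp [hc]
    · rw [Int.add_mul_ediv_left _ _ (ne_of_gt hv), Int.ediv_eq_zero_of_lt (by omega) (by omega)]
      simp [hc]

lemma pvPasses_succ (v ans : Int) (hv : 0 < v) (r : Int) (hr0 : 0 ≤ r) (hr1 : r < v) :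
    pvPasses v (ans + 1) r = pvPasses v ans r + (if r = ans % v then 1 else 0) := by
  obtain ⟨hm, hd⟩ := pvSucc v ans hv
  have hs0 : 0 ≤ ans % v := Int.emod_nonneg ans (ne_of_gt hv)
  have hs1 : ans % v < v := Int.emod_lt_of_pos ans hv
  unfold pvPasses
  rw [hm, hd]
  split_ifs <;> omega

lemma pvIdx_succ (v ans : Int) (hv : 0 < v) :
    (if ans % v < v - 1 then ans % v + 1 else 0) = (ans + 1) % v := by
  obtain ⟨hm, _⟩ := pvSucc v ans hv
  have hs0 : 0 ≤ ans % v := Int.emod_nonneg ans (ne_of_gt hv)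
  have hs1 : ans % v < v := Int.emod_lt_of_pos ans hv
  rw [hm]
  split_ifs <;> omega

lemma pvRes_bounds (v x : Int) (hv : 0 < v) : 0 ≤ pvRes v x ∧ pvRes v x < v :=
  ⟨PySem.Int.mod_nonneg x hv, PySem.Int.mod_lt x hv⟩

lemma pvSum_ind (v c : Int) (h0 : 0 ≤ c) (h1 : c < v) :
    ((PySem.List.pyRange 0 v).map (fun r => if r = c then (1 : Int) else 0)).sum = 1 := by
  have h : ((PySem.List.pyRange 0 v).map
      (fun r => if (fun r => r == c) r = true then (1 : Int) else 0)).sum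
      = ((PySem.List.pyRange 0 v).countP (fun r => r == c) : Int) :=
    PySem.List.sum_map_ite_one_zero (fun r => r == c) _
  simp only [beq_iff_eq] at h
  rw [h]
  have : (PySem.List.pyRange 0 v).countP (fun r => r == c) = (PySem.List.pyRange 0 v).count c :=
    rfl
  rw [this, List.count_eq_one_of_mem (PySem.List.nodup_pyRange_one 0 v)
    (PySem.List.mem_pyRange_one.mpr ⟨h0, h1⟩)]
  rfl

lemma pvCnt_append (v : Int) (l : List Int) (x r : Int) :
    pvCnt v (l ++ [x]) r = pvCnt v l r + (if r = pvRes v x then 1 else 0) := by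
  unfold pvCnt
  rw [List.map_append, List.count_append, List.map_singleton, List.count_singleton]
  push_cast
  by_cases h : r = pvRes v x
  · rw [if_pos h, if_pos (by simp [h])]
  · rw [if_neg h, if_neg (by simp only [beq_iff_eq]; exact fun e => h e.symm)]

lemma pvSum_cnt (v : Int) (hv : 0 < v) (l : List Int) :
    ((PySem.List.pyRange 0 v).map (pvCnt v l)).sum = (l.length : Int) := by
  induction l using List.reverseRecOn with
  | nil =>
    have h0 : ∀ r ∈ PySem.List.pyRange 0 v, pvCnt v [] r = 0 := by
      intro r _; unfold pvCnt; simp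
    rw [List.map_congr_left h0]
    simp
  | append_singleton t x ih =>
    have hmc : ((PySem.List.pyRange 0 v).map (pvCnt v (t ++ [x]))) =
        ((PySem.List.pyRange 0 v).map (fun r => pvCnt v t r + (if r = pvRes v x then 1 else 0))) :=
      List.map_congr_left (fun r _ => pvCnt_append v t x r)
    rw [hmc, PySem.List.sum_map_add_int, ih,
      pvSum_ind v (pvRes v x) (pvRes_bounds v x hv).1 (pvRes_bounds v x hv).2]
    simp

lemma pvSum_passes (v : Int) (hv : 0 < v) (ans : Int) (ha : 0 ≤ ans) :
    ((PySem.List.pyRange 0 v).map (pvPasses v ans)).sum = ans := by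
  obtain ⟨n, rfl⟩ := Int.eq_ofNat_of_zero_le ha
  clear ha
  induction n with
  | zero =>
    simp only [Nat.cast_zero]
    have h0 : ∀ r ∈ PySem.List.pyRange 0 v, pvPasses v 0 r = 0 := by
      intro r hr
      obtain ⟨hr0, _⟩ := PySem.List.mem_pyRange_one.mp hr
      unfold pvPasses
      simp
      omega
    rw [List.map_congr_left h0]
    simp
  | succ n ih =>
    have hs0 : 0 ≤ (n : Int) % v := Int.emod_nonneg _ (ne_of_gt hv)
    have hs1 : (n : Int) % v < v := Int.emod_lt_of_pos _ hv
    have hmc : ((PySem.List.pyRange 0 v).map (pvPasses v ((n : Int) + 1))) =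
        ((PySem.List.pyRange 0 v).map
          (fun r => pvPasses v (n : Int) r + (if r = (n : Int) % v then 1 else 0))) := by
      refine List.map_congr_left (fun r hr => ?_)
      obtain ⟨hr0, hr1⟩ := PySem.List.mem_pyRange_one.mp hr
      exact pvPasses_succ v (n : Int) hv r hr0 hr1
    push_cast
    rw [hmc, PySem.List.sum_map_add_int, ih, pvSum_ind v ((n : Int) % v) hs0 hs1]

lemma pvInv_ans_le (v : Int) (hv : 0 < v) (l : List Int) (seen : PySem.Dict Int Int)
    (idx ans : Int) (hI : pvInv v l seen idx ans) : ans ≤ (l.length : Int) := by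
  obtain ⟨_, _, h3, h4⟩ := hI
  have hle : ((PySem.List.pyRange 0 v).map (pvPasses v ans)).sum ≤
      ((PySem.List.pyRange 0 v).map (pvCnt v l)).sum := by
    refine List.sum_le_sum (fun r hr => ?_)
    obtain ⟨hr0, hr1⟩ := PySem.List.mem_pyRange_one.mp hr
    exact h4 r hr0 hr1
  rw [pvSum_passes v hv ans h3, pvSum_cnt v hv l] at hle
  exact hle

lemma pvWhile (v : Int) (hv : 0 < v) (l : List Int) :
    ∀ (fuel : Nat) (seen : PySem.Dict Int Int) (idx ans : Int),
      pvInv v l seen idx ans → (l.length : Int) < ans + fuel →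
      pvInv v l (fasterWhile fuel v seen idx ans).1 (fasterWhile fuel v seen idx ans).2.1
        (fasterWhile fuel v seen idx ans).2.2 ∧
      (fasterWhile fuel v seen idx ans).1.getD (fasterWhile fuel v seen idx ans).2.1 0 = 0 := by
  intro fuel
  induction fuel with
  | zero =>
    intro seen idx ans hI hf
    exfalso
    have := pvInv_ans_le v hv l seen idx ans hI
    push_cast at hf
    omega
  | succ n ih =>
    intro seen idx ans hI hf
    obtain ⟨h1, h2, h3, h4⟩ := hI
    have hs0 : 0 ≤ ans % v := Int.emod_nonneg ans (ne_of_gt hv)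
    have hs1 : ans % v < v := Int.emod_lt_of_pos ans hv
    have hidx0 : 0 ≤ idx := h2 ▸ hs0
    have hidxv : idx < v := h2 ▸ hs1
    by_cases hc : seen.getD idx 0 > 0
    · have hstep : fasterWhile (n + 1) v seen idx ans =
          fasterWhile n v (seen.insert idx (seen.getD idx 0 - 1))
            (if idx < v - 1 then idx + 1 else 0) (ans + 1) := by
        simp only [fasterWhile, if_pos hc]
      rw [hstep]
      apply ih
      · refine ⟨?_, ?_, by omega, ?_⟩
        · intro r hr0 hr1
          rw [PySem.Dict.getD_insert, pvPasses_succ v ans hv r hr0 hr1]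
          by_cases hre : r = idx
          · rw [if_pos hre, hre, h1 idx hidx0 hidxv, if_pos (hre ▸ h2 ▸ hre ▸ rfl : idx = ans % v)]
            omega
          · rw [if_neg hre, h1 r hr0 hr1, if_neg (h2 ▸ hre : ¬ r = ans % v)]
            omega
        · rw [h2, pvIdx_succ v ans hv]
        · intro r hr0 hr1
          rw [pvPasses_succ v ans hv r hr0 hr1]
          by_cases hre : r = ans % v
          · have hgd := h1 r hr0 hr1
            rw [if_pos hre]
            have : seen.getD r 0 > 0 := by rw [hre, ← h2]; exact hc
            omega
          · rw [if_neg hre]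
            have := h4 r hr0 hr1
            omega
      · push_cast at hf ⊢
        omega
    · have hstop : fasterWhile (n + 1) v seen idx ans = (seen, idx, ans) := by
        simp only [fasterWhile, if_neg hc]
      rw [hstop]
      refine ⟨⟨h1, h2, h3, h4⟩, ?_⟩
      show seen.getD idx 0 = 0
      have ha := h1 idx hidx0 hidxv
      have hb := h4 idx hidx0 hidxv
      omega

lemma pvInsert_step (v : Int) (hv : 0 < v) (l : List Int) (seen : PySem.Dict Int Int)
    (idx ans x : Int) (hI : pvInv v l seen idx ans) :
    pvInv v (l ++ [x]) (seen.insert (pvRes v x) (seen.getD (pvRes v x) 0 + 1)) idx ans := by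
  obtain ⟨h1, h2, h3, h4⟩ := hI
  obtain ⟨hx0, hx1⟩ := pvRes_bounds v x hv
  refine ⟨?_, h2, h3, ?_⟩
  · intro r hr0 hr1
    rw [PySem.Dict.getD_insert, pvCnt_append]
    by_cases hre : r = pvRes v x
    · rw [if_pos hre, if_pos hre, hre, h1 (pvRes v x) hx0 hx1]
      omega
    · rw [if_neg hre, if_neg hre, h1 r hr0 hr1]
      omega
  · intro r hr0 hr1
    rw [pvCnt_append]
    have := h4 r hr0 hr1
    split_ifs <;> omega

lemma pvFold (v : Int) (hv : 0 < v) (nums : List Int) :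
    ∀ (l pre : List Int) (seen : PySem.Dict Int Int) (idx ans : Int),
      pre ++ l = nums → pvInv v pre seen idx ans → seen.getD idx 0 = 0 →
      pvInv v nums
        (l.foldl (fun (st : PySem.Dict Int Int × Int × Int) num =>
          fasterWhile (nums.length + 1) v
            (st.1.insert (PySem.Int.mod num v) (st.1.getD (PySem.Int.mod num v) 0 + 1))
            st.2.1 st.2.2) (seen, idx, ans)).1
        (l.foldl (fun (st : PySem.Dict Int Int × Int × Int) num =>
          fasterWhile (nums.length + 1) v
            (st.1.insert (PySem.Int.mod num v) (st.1.getD (PySem.Int.mod num v) 0 + 1))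
            st.2.1 st.2.2) (seen, idx, ans)).2.1
        (l.foldl (fun (st : PySem.Dict Int Int × Int × Int) num =>
          fasterWhile (nums.length + 1) v
            (st.1.insert (PySem.Int.mod num v) (st.1.getD (PySem.Int.mod num v) 0 + 1))
            st.2.1 st.2.2) (seen, idx, ans)).2.2 ∧
      ((l.foldl (fun (st : PySem.Dict Int Int × Int × Int) num =>
          fasterWhile (nums.length + 1) v
            (st.1.insert (PySem.Int.mod num v) (st.1.getD (PySem.Int.mod num v) 0 + 1))
            st.2.1 st.2.2) (seen, idx, ans)).1).getD
        ((l.foldl (fun (st : PySem.Dict Int Int × Int × Int) num =>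
          fasterWhile (nums.length + 1) v
            (st.1.insert (PySem.Int.mod num v) (st.1.getD (PySem.Int.mod num v) 0 + 1))
            st.2.1 st.2.2) (seen, idx, ans)).2.1) 0 = 0 := by
  intro l
  induction l with
  | nil =>
    intro pre seen idx ans hpre hI hE
    rw [List.append_nil] at hpre
    subst hpre
    exact ⟨hI, hE⟩
  | cons x t ih =>
    intro pre seen idx ans hpre hI hE
    rw [List.foldl_cons]
    have hI' := pvInsert_step v hv pre seen idx ans x hI
    have hlen : pre.length + 1 + t.length = nums.length := by
      rw [← hpre]; simp; omega
    have hans : 0 ≤ ans := hI.2.2.1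
    have hW := pvWhile v hv (pre ++ [x]) (nums.length + 1)
      (seen.insert (pvRes v x) (seen.getD (pvRes v x) 0 + 1)) idx ans hI'
      (by push_cast; simp; omega)
    have hprepend : (pre ++ [x]) ++ t = nums := by
      rw [List.append_assoc]; simpa using hpre
    obtain ⟨hIW, hEW⟩ := hW
    have := ih (pre ++ [x])
      (fasterWhile (nums.length + 1) v
        (seen.insert (pvRes v x) (seen.getD (pvRes v x) 0 + 1)) idx ans).1
      (fasterWhile (nums.length + 1) v
        (seen.insert (pvRes v x) (seen.getD (pvRes v x) 0 + 1)) idx ans).2.1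
      (fasterWhile (nums.length + 1) v
        (seen.insert (pvRes v x) (seen.getD (pvRes v x) 0 + 1)) idx ans).2.2
      hprepend hIW hEW
    simpa [pvRes] using this

lemma pvFinal (v : Int) (hv : 0 < v) (l : List Int) (seen : PySem.Dict Int Int)
    (idx ans : Int) (hI : pvInv v l seen idx ans) (hE : seen.getD idx 0 = 0) :
    PySem.List.minD ((PySem.List.pyRange 0 v).map (fun r => r + pvCnt v l r * v))
      (fun x => x) 0 = ans := by
  obtain ⟨h1, h2, h3, h4⟩ := hI
  subst h2
  have hs0 : 0 ≤ ans % v := Int.emod_nonneg ans (ne_of_gt hv)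
  have hs1 : ans % v < v := Int.emod_lt_of_pos ans hv
  have hdm := Int.ediv_add_emod ans v
  have hcnt_s : pvCnt v l (ans % v) = ans / v := by
    have := h1 (ans % v) hs0 hs1
    rw [hE] at this
    unfold pvPasses at this
    rw [if_neg (lt_irrefl (ans % v))] at this
    omega
  have hmem : ans ∈ (PySem.List.pyRange 0 v).map (fun r => r + pvCnt v l r * v) := by
    refine List.mem_map.mpr ⟨ans % v, PySem.List.mem_pyRange_one.mpr ⟨hs0, hs1⟩, ?_⟩
    rw [hcnt_s]
    have : (ans / v) * v = v * (ans / v) := by ring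
    rw [this]
    omega
  have hmin : ∀ y ∈ (PySem.List.pyRange 0 v).map (fun r => r + pvCnt v l r * v), ans ≤ y := by
    intro y hy
    obtain ⟨r, hr, rfl⟩ := List.mem_map.mp hy
    obtain ⟨hr0, hr1⟩ := PySem.List.mem_pyRange_one.mp hr
    have hp := h4 r hr0 hr1
    have hmul : pvPasses v ans r * v ≤ pvCnt v l r * v :=
      mul_le_mul_of_nonneg_right hp (le_of_lt hv)
    have hlow : ans ≤ r + pvPasses v ans r * v := by
      unfold pvPasses
      split_ifs with hcase
      · have he : (ans / v + 1) * v = v * (ans / v) + v := by ring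
        rw [he]; omega
      · have he : (ans / v + 0) * v = v * (ans / v) := by ring
        simp only [add_zero] at he ⊢
        rw [he]; omega
    omega
  have hne : (PySem.List.pyRange 0 v).map (fun r => r + pvCnt v l r * v) ≠ [] := by
    intro hnil
    rw [hnil] at hmem
    exact absurd hmem (List.not_mem_nil)
  cases hm : PySem.List.min? ((PySem.List.pyRange 0 v).map (fun r => r + pvCnt v l r * v))
      (fun x => x) with
  | none => exact absurd ((PySem.List.min?_eq_none_iff _ _).mp hm) hne
  | some m =>
    have hmm := PySem.List.min?_mem hm
    have hmlow := PySem.List.min?_isMin hm ans hmem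
    have := hmin m hmm
    simp [PySem.List.minD, hm]
    omega

lemma pvSeen0_getD (L : List Int) :
    ∀ r : Int, (PySem.Dict.mk (L.map (fun k => (k, (0 : Int))))).getD r 0 = 0 := by
  induction L with
  | nil => intro r; rfl
  | cons x t ih =>
    intro r
    rw [List.map_cons, PySem.Dict.getD_eq_get?_getD, PySem.Dict.get?_mk_cons]
    by_cases h : (x == r : Bool)
    · simp [h]
    · rw [if_neg (by simp_all), ← PySem.Dict.getD_eq_get?_getD]
      exact ih r

lemma pvAlt_eq (nums : List Int) (v : Int) :
    faster_alt nums v = PySem.List.minD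
      ((PySem.List.pyRange 0 v).map (fun r => r + pvCnt v nums r * v)) (fun x => x) 0 := by
  simp only [faster_alt]
  have hfold : nums.foldl
      (fun (d : PySem.Dict Int Int) num =>
        d.insert (PySem.Int.mod num v) (d.getD (PySem.Int.mod num v) 0 + 1))
      PySem.Dict.empty
      = (nums.map (pvRes v)).foldl
        (fun (d : PySem.Dict Int Int) x => d.insert x (d.getD x 0 + 1)) PySem.Dict.empty := by
    rw [List.foldl_map]
    rfl
  have hgetD : ∀ r, (nums.foldl
      (fun (d : PySem.Dict Int Int) num =>
        d.insert (PySem.Int.mod num v) (d.getD (PySem.Int.mod num v) 0 + 1))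
      PySem.Dict.empty).getD r 0 = pvCnt v nums r := by
    intro r
    rw [hfold, PySem.Dict.getD_foldl_insert_add_one]
    unfold pvCnt
    simp
  have hmc : ((PySem.List.pyRange 0 v).map (fun rem => rem +
      (nums.foldl (fun (d : PySem.Dict Int Int) num =>
        d.insert (PySem.Int.mod num v) (d.getD (PySem.Int.mod num v) 0 + 1))
        PySem.Dict.empty).getD rem 0 * v)) =
      ((PySem.List.pyRange 0 v).map (fun r => r + pvCnt v nums r * v)) :=
    List.map_congr_left (fun r _ => by rw [hgetD r])
  rw [hmc]

-- ===== VERDICT (by name: the statement is the Claim_ definition above) =====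
theorem faster_spec : Claim_equal_faster := by
  intro nums v _ hpre
  unfold Spec_faster
  by_cases hv : 0 < v
  · have hseen0 : ∀ r, (PySem.Dict.mk
        ((PySem.List.pyRange 0 v).map (fun rem => (rem, (0 : Int))))).getD r 0 = 0 :=
      pvSeen0_getD _
    have hI0 : pvInv v [] (PySem.Dict.mk
        ((PySem.List.pyRange 0 v).map (fun rem => (rem, (0 : Int))))) 0 0 := by
      refine ⟨?_, by simp, le_refl 0, ?_⟩
      · intro r hr0 hr1
        rw [hseen0 r]
        unfold pvCnt pvPasses
        simp
        omega
      · intro r hr0 hr1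
        unfold pvCnt pvPasses
        simp
        omega
    have hF := pvFold v hv nums nums [] _ 0 0 rfl hI0 (hseen0 0)
    obtain ⟨hIF, hEF⟩ := hF
    have hfin := pvFinal v hv nums _ _ _ hIF hEF
    rw [pvAlt_eq nums v]
    simp only [faster]
    exact hfin.symm
  · have hnil : nums = [] := by
      rcases hpre with h | h
      · exact absurd h hv
      · exact h
    subst hnil
    have hrange : PySem.List.pyRange 0 v = [] := by
      refine List.eq_nil_of_length_eq_zero ?_
      rw [PySem.List.length_pyRange_one]
      omega
    simp only [faster, faster_alt]
    simp [hrange, PySem.List.minD, PySem.List.min?]
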